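-- pv_equiv track=rewrite | github.com/JKHira/sdsl2_coder | L1_builder/contract_error_model_lint.py | _is_string_union
-- ===== SOURCE A (Python) =====
-- def _strip_outer_parens(expr: str) -> str:
--     expr = expr.strip()
--     while expr.startswith("(") and expr.endswith(")"):
--         depth = 0
--         in_string: str | None = None
--         escaped = False
--         valid = True
--         for idx, ch in enumerate(expr):
--             if in_string:
--                 if escaped:
--                     escaped = False
--                 elif ch == "\\":
--                     escaped = True
--                 elif ch == in_string:
--                     in_string = None
--                 continue
--             if ch in ('"', "'"):
--                 in_string = ch
--                 continue
--             if ch == "(":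
--                 depth += 1
--             elif ch == ")":
--                 depth -= 1
--                 if depth == 0 and idx != len(expr) - 1:
--                     valid = False
--                     break
--         if not valid or depth != 0:
--             break
--         expr = expr[1:-1].strip()
--     return expr
--
-- def _is_string_union(expr: str) -> bool:
--     expr = _strip_outer_parens(expr)
--     if not expr:
--         return False
--     i = 0
--     expect_literal = True
--     while i < len(expr):
--         while i < len(expr) and expr[i].isspace():
--             i += 1
--         if i >= len(expr):
--             break
--         if expect_literal:
--             if expr[i] != '"':
--                 return False
--             i += 1
--             escaped = False
--             while i < len(expr):
--                 ch = expr[i]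
--                 if escaped:
--                     escaped = False
--                 elif ch == "\\":
--                     escaped = True
--                 elif ch == '"':
--                     i += 1
--                     break
--                 i += 1
--             else:
--                 return False
--             expect_literal = False
--         else:
--             while i < len(expr) and expr[i].isspace():
--                 i += 1
--             if i >= len(expr):
--                 break
--             if expr[i] != "|":
--                 return False
--             i += 1
--             expect_literal = True
--     return not expect_literal
-- ===== SOURCE B (Python) =====
-- def _mask(s: str) -> str:
--     """Same-length copy of s with every string-literal character (quotes,
--     contents, escapes) replaced by a space, so parens can be counted blindly."""
--     out = []
--     i = 0
--     n = len(s)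
--     while i < n:
--         ch = s[i]
--         if ch in ('"', "'"):
--             q = ch
--             out.append(" ")
--             i += 1
--             while i < n:
--                 c = s[i]
--                 out.append(" ")
--                 i += 1
--                 if c == "\\":
--                     if i < n:
--                         out.append(" ")
--                         i += 1
--                 elif c == q:
--                     break
--         else:
--             out.append(ch)
--             i += 1
--     return "".join(out)
--
--
-- def _strip_outer_parens(expr: str) -> str:
--     expr = expr.strip()
--     while expr.startswith("(") and expr.endswith(")"):
--         depths = []
--         d = 0
--         for ch in _mask(expr):
--             d += (ch == "(") - (ch == ")")
--             depths.append(d)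
--         if depths and depths[-1] == 0 and all(x >= 1 for x in depths[:-1]):
--             expr = expr[1:-1].strip()
--         else:
--             break
--     return expr
--
--
-- def _scan_literal(s: str, i: int):
--     """Index just past the closing '"' of a literal opened before i, or None."""
--     n = len(s)
--     while i < n:
--         c = s[i]
--         if c == '"':
--             return i + 1
--         if c == "\\":
--             i += 2
--         else:
--             i += 1
--     return None
--
--
-- def _tokenize(s: str):
--     """'lit'/'pipe' token list, or None on any invalid char or unterminated literal."""
--     tokens = []
--     i = 0
--     n = len(s)
--     while i < n:
--         ch = s[i]
--         if ch.isspace():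
--             i += 1
--         elif ch == '"':
--             j = _scan_literal(s, i + 1)
--             if j is None:
--                 return None
--             tokens.append("lit")
--             i = j
--         elif ch == "|":
--             tokens.append("pipe")
--             i += 1
--         else:
--             return None
--     return tokens
--
--
-- def _is_string_union(expr: str) -> bool:
--     expr = _strip_outer_parens(expr)
--     if not expr:
--         return False
--     tokens = _tokenize(expr)
--     if tokens is None:
--         return False
--     return len(tokens) % 2 == 1 and all(
--         t == ("lit" if i % 2 == 0 else "pipe") for i, t in enumerate(tokens)
--     )
-- ===== Notes on version B (the rewrite author's own statement) =====
-- stated objective: alternative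
-- what changed: A's two interleaved character state machines are replaced by staged passes: the paren stripper first masks string-literal characters to spaces and then checks a running-depth list (last depth 0, all earlier depths >= 1), and the union check first tokenizes the stripped string into literal/pipe tokens and then validates the token list by index parity (odd length, literals at even indices, pipes at odd indices).
import Mathlib
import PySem

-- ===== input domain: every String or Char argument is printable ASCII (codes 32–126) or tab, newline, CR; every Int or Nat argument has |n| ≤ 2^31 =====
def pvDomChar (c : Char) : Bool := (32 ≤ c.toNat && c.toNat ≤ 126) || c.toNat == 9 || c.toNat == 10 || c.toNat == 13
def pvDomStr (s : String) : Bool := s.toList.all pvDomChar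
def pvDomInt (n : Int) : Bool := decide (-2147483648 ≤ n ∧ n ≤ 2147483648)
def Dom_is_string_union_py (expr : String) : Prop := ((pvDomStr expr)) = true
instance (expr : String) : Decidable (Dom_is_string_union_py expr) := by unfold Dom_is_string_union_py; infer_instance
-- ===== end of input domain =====

-- B replaces A's interleaved state machines by staged passes: the paren stripper first
-- masks out string literals, then checks a running-depth list; the union check first
-- tokenizes into literal/pipe tokens, then validates the token sequence by index parity.
-- Alternative decomposition, not faster.

-- ===== PORT A =====
-- A's _strip_outer_parens: the inner for-loop over enumerate(expr)
def pvCheckParens : List (Int × Char) → Int → Int → Option Char → Bool → Bool × Int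
  | [], _, depth, _, _ => (true, depth)
  | (idx, ch) :: rest, n, depth, inString, escaped =>
    match inString with
    | some q =>
      if escaped then pvCheckParens rest n depth (some q) false
      else if ch = '\\' then pvCheckParens rest n depth (some q) true
      else if ch = q then pvCheckParens rest n depth none escaped
      else pvCheckParens rest n depth (some q) escaped
    | none =>
      if ch = '"' ∨ ch = '\'' then pvCheckParens rest n depth (some ch) escaped
      else if ch = '(' then pvCheckParens rest n (depth + 1) none escaped
      else if ch = ')' then
        if depth - 1 = 0 ∧ idx ≠ n - 1 then (false, depth - 1)
        else pvCheckParens rest n (depth - 1) none escaped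
      else pvCheckParens rest n depth none escaped

-- length lemmas cited by the strip loops' decreasing_by
theorem pvStrip_len_le (cs : List Char) : (PySem.Chars.strip cs).length ≤ cs.length := by
  simp only [PySem.Chars.strip, PySem.Chars.lstrip, PySem.Chars.rstrip]
  have h1 := List.length_dropWhile_le PySem.Chars.isspace
      (List.dropWhile PySem.Chars.isspace cs).reverse
  have h2 := List.length_dropWhile_le PySem.Chars.isspace cs
  simp only [List.length_reverse] at *
  omega

theorem pvSlice_len_lt (cs : List Char) (h : cs ≠ []) :
    (PySem.List.slice cs (some 1) (some (-1))).length < cs.length := by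
  have hl : 0 < cs.length := List.length_pos_iff.mpr h
  simp [PySem.List.slice, PySem.List.clampIdx]
  omega

-- the while loop of A's _strip_outer_parens
def pvStripGo (cs : List Char) : List Char :=
  if h : PySem.Chars.startswith cs ['('] && PySem.Chars.endswith cs [')'] then
    let r := pvCheckParens (PySem.List.enumerate cs 0) cs.length 0 none false
    if !r.1 || r.2 ≠ 0 then cs
    else pvStripGo (PySem.Chars.strip (PySem.List.slice cs (some 1) (some (-1))))
  else cs
termination_by cs.length
decreasing_by
  have hne : cs ≠ [] := by
    intro hnil
    subst hnil
    simp [PySem.Chars.startswith, List.isPrefixOf] at h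
  calc (PySem.Chars.strip (PySem.List.slice cs (some 1) (some (-1)))).length
      ≤ (PySem.List.slice cs (some 1) (some (-1))).length := pvStrip_len_le _
    _ < cs.length := pvSlice_len_lt cs hne

def pvStripOuterParens (cs : List Char) : List Char :=
  pvStripGo (PySem.Chars.strip cs)

-- A's escape-aware scan of one string literal (the inner while with the escaped flag),
-- returning the suffix after the closing '"', or none if unterminated
def pvScanLit : List Char → Bool → Option (List Char)
  | [], _ => none
  | ch :: rest, escaped =>
    if escaped then pvScanLit rest false
    else if ch = '\\' then pvScanLit rest true
    else if ch = '"' then some rest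
    else pvScanLit rest false

-- cited by pvALoop's decreasing_by
theorem pvScanLit_len {cs r : List Char} {e : Bool} (h : pvScanLit cs e = some r) :
    r.length < cs.length := by
  induction cs generalizing e with
  | nil => simp [pvScanLit] at h
  | cons c rest ih =>
    simp only [pvScanLit] at h
    split_ifs at h with h1 h2 h3
    · exact Nat.lt_succ_of_lt (ih h)
    · exact Nat.lt_succ_of_lt (ih h)
    · cases h; exact Nat.lt_succ_self _
    · exact Nat.lt_succ_of_lt (ih h)

-- A's main while loop over the remaining suffix (index i advancing = consuming the head)
def pvALoop (cs : List Char) (expectLiteral : Bool) : Bool :=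
  match h1 : cs.dropWhile PySem.Chars.isspace with
  | [] => !expectLiteral
  | c :: rest =>
    if expectLiteral then
      if c ≠ '"' then false
      else
        match h2 : pvScanLit rest false with
        | none => false
        | some r => pvALoop r false
    else
      match h3 : (c :: rest).dropWhile PySem.Chars.isspace with
      | [] => !expectLiteral
      | c2 :: rest2 => if c2 ≠ '|' then false else pvALoop rest2 true
termination_by cs.length
decreasing_by
  · have hd := List.length_dropWhile_le PySem.Chars.isspace cs
    rw [h1] at hd
    have hr := pvScanLit_len h2
    simp only [List.length_cons] at hd
    omega
  · have hd := List.length_dropWhile_le PySem.Chars.isspace cs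
    rw [h1] at hd
    have hd2 := List.length_dropWhile_le PySem.Chars.isspace (c :: rest)
    rw [h3] at hd2
    simp only [List.length_cons] at hd hd2
    omega

def is_string_union_py (expr : String) : Bool :=
  let cs := pvStripOuterParens expr.toList
  if cs = [] then false
  else pvALoop cs true

-- ===== PORT B =====
-- B pass 1 of the stripper: _mask — same-length copy with every string-literal
-- character blanked to ' ' (pvMaskOut: outside a literal; pvMaskIn: inside one,
-- a backslash also blanking the following character if any — `if i < n` in Source B)
mutual
def pvMaskOut : List Char → List Char
  | [] => []
  | ch :: rest =>
    if ch = '"' ∨ ch = '\'' then ' ' :: pvMaskIn ch rest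
    else ch :: pvMaskOut rest
termination_by cs => cs.length

def pvMaskIn (q : Char) : List Char → List Char
  | [] => []
  | c :: rest =>
    if c = '\\' then
      if rest.isEmpty then [' '] else ' ' :: ' ' :: pvMaskIn q rest.tail
    else if c = q then ' ' :: pvMaskOut rest
    else ' ' :: pvMaskIn q rest
termination_by cs => cs.length
decreasing_by
  · simp only [List.length_tail, List.length_cons]; omega
  · simp
  · simp
end

-- B pass 2: the running-depth list of the masked string (the for-loop building depths)
def pvDepths (d : Int) : List Char → List Int
  | [] => []
  | ch :: rest =>
    ((d + (if ch = '(' then 1 else 0) - (if ch = ')' then 1 else 0)) ::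
      pvDepths (d + (if ch = '(' then 1 else 0) - (if ch = ')' then 1 else 0)) rest)

-- B pass 3: `depths and depths[-1] == 0 and all(x >= 1 for x in depths[:-1])`
def pvBStrippable (cs : List Char) : Bool :=
  let D := pvDepths 0 (pvMaskOut cs)
  !D.isEmpty && decide (D.getLastD 0 = 0) && D.dropLast.all (fun x => decide (1 ≤ x))

-- the while loop of B's _strip_outer_parens
def pvBStripGo (cs : List Char) : List Char :=
  if h : PySem.Chars.startswith cs ['('] && PySem.Chars.endswith cs [')'] then
    if pvBStrippable cs then
      pvBStripGo (PySem.Chars.strip (PySem.List.slice cs (some 1) (some (-1))))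
    else cs
  else cs
termination_by cs.length
decreasing_by
  have hne : cs ≠ [] := by
    intro hnil
    subst hnil
    simp [PySem.Chars.startswith, List.isPrefixOf] at h
  calc (PySem.Chars.strip (PySem.List.slice cs (some 1) (some (-1)))).length
      ≤ (PySem.List.slice cs (some 1) (some (-1))).length := pvStrip_len_le _
    _ < cs.length := pvSlice_len_lt cs hne

def pvBStrip (cs : List Char) : List Char :=
  pvBStripGo (PySem.Chars.strip cs)

-- B's _scan_literal: suffix just past the closing '"'; a backslash advances by two
-- (`i += 2`, i.e. the tail of the tail; past-the-end behaves like the exhausted loop)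
def pvSkipLit : List Char → Option (List Char)
  | [] => none
  | c :: rest =>
    if c = '"' then some rest
    else if c = '\\' then pvSkipLit rest.tail
    else pvSkipLit rest
termination_by cs => cs.length
decreasing_by
  · simp only [List.length_tail, List.length_cons]; omega
  · simp

-- cited by pvTokenize's decreasing_by
theorem pvSkipLit_len : ∀ (n : Nat) (cs : List Char), cs.length ≤ n →
    ∀ {r : List Char}, pvSkipLit cs = some r → r.length < cs.length := by
  intro n
  induction n with
  | zero =>
    intro cs h r hr
    have : cs = [] := List.eq_nil_of_length_eq_zero (Nat.le_zero.mp h)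
    subst this
    simp [pvSkipLit] at hr
  | succ n ih =>
    intro cs h r hr
    cases cs with
    | nil => simp [pvSkipLit] at hr
    | cons c rest =>
      rw [pvSkipLit] at hr
      simp only [List.length_cons] at h
      by_cases h1 : c = '"'
      · rw [if_pos h1] at hr
        cases hr
        simp
      · rw [if_neg h1] at hr
        by_cases h2 : c = '\\'
        · rw [if_pos h2] at hr
          have ht : rest.tail.length ≤ n := by
            have := List.length_tail (l := rest)
            omega
          have := ih rest.tail ht hr
          have := List.length_tail (l := rest)
          simp only [List.length_cons]
          omega
        · rw [if_neg h2] at hr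
          have := ih rest (by omega) hr
          simp only [List.length_cons]
          omega

inductive PvTok
  | lit
  | pipe
deriving DecidableEq, Repr

-- B's _tokenize: scan into lit/pipe tokens; none on any invalid char or open literal
def pvTokenize (cs : List Char) : Option (List PvTok) :=
  match cs with
  | [] => some []
  | c :: rest =>
    if PySem.Chars.isspace c then pvTokenize rest
    else if c = '"' then
      match h : pvSkipLit rest with
      | none => none
      | some r => (pvTokenize r).map (PvTok.lit :: ·)
    else if c = '|' then (pvTokenize rest).map (PvTok.pipe :: ·)
    else none
termination_by cs.length
decreasing_by
  · simp
  · have := pvSkipLit_len rest.length rest le_rfl h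
    simp only [List.length_cons]
    omega
  · simp

-- B's validation: odd length, literal tokens at even and pipes at odd indices
def pvValidate (ts : List PvTok) : Bool :=
  decide (ts.length % 2 = 1) &&
    (PySem.List.enumerate ts 0).all
      (fun p => p.2 == if p.1 % 2 == 0 then PvTok.lit else PvTok.pipe)

def is_string_union_py_alt (expr : String) : Bool :=
  let cs := pvBStrip expr.toList
  if cs = [] then false
  else
    match pvTokenize cs with
    | none => false
    | some ts => pvValidate ts

-- ===== PRECONDITION & SPEC =====
def Spec_is_string_union_py (expr : String) (out : Bool) : Prop := out = is_string_union_py_alt expr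
instance (expr : String) (out : Bool) : Decidable (Spec_is_string_union_py expr out) := by unfold Spec_is_string_union_py; infer_instance

-- ===== CLAIM (what is proved, stated in full; the proofs are below) =====
def Claim_equal_is_string_union_py : Prop := ∀ (expr : String), Dom_is_string_union_py expr → Spec_is_string_union_py expr (is_string_union_py expr)

-- ===== LEMMAS AND PROOFS =====

------------------------------------------------------------------
-- Part 1: the two strippers agree
------------------------------------------------------------------

-- A's paren check, structurally (the index test `idx ≠ n-1` becomes `rest ≠ []`)
def pvChk : List Char → Int → Option Char → Bool → Bool × Int
  | [], d, _, _ => (true, d)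
  | ch :: rest, d, some q, esc =>
    if esc then pvChk rest d (some q) false
    else if ch = '\\' then pvChk rest d (some q) true
    else if ch = q then pvChk rest d none esc
    else pvChk rest d (some q) esc
  | ch :: rest, d, none, esc =>
    if ch = '"' ∨ ch = '\'' then pvChk rest d (some ch) esc
    else if ch = '(' then pvChk rest (d + 1) none esc
    else if ch = ')' then
      if d - 1 = 0 ∧ rest ≠ [] then (false, d - 1)
      else pvChk rest (d - 1) none esc
    else pvChk rest d none esc

theorem pvCheckParens_enum (cs : List Char) : ∀ (i : Int) (d : Int) (st : Option Char) (esc : Bool),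
    pvCheckParens (PySem.List.enumerate cs i) (i + cs.length) d st esc = pvChk cs d st esc := by
  induction cs with
  | nil => intro i d st esc; simp [PySem.List.enumerate_nil, pvCheckParens, pvChk]
  | cons c rest ih =>
    intro i d st esc
    rw [PySem.List.enumerate_cons]
    have hn : i + ((c :: rest).length : Int) = (i + 1) + (rest.length : Int) := by
      simp; ring
    have hidx : (i ≠ i + ((c :: rest).length : Int) - 1) ↔ rest ≠ [] := by
      simp only [List.length_cons]
      push_cast
      constructor
      · intro h hnil; subst hnil; simp at h
      · intro h
        have : (0:Int) < rest.length := by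
          have : rest.length ≠ 0 := fun hz => h (List.eq_nil_of_length_eq_zero hz)
          omega
        omega
    cases st with
    | some q =>
      simp only [pvCheckParens, pvChk]
      split_ifs <;> rw [hn] <;> exact ih _ _ _ _
    | none =>
      simp only [pvCheckParens, pvChk]
      by_cases hq : c = '"' ∨ c = '\''
      · simp only [if_pos hq]; rw [hn]; exact ih _ _ _ _
      · simp only [if_neg hq]
        by_cases hl : c = '('
        · simp only [if_pos hl]; rw [hn]; exact ih _ _ _ _
        · simp only [if_neg hl]
          by_cases hr : c = ')'
          · simp only [if_pos hr]
            by_cases hc : d - 1 = 0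
            · by_cases hrest : rest = []
              · have : ¬ (i ≠ i + ((c :: rest).length : Int) - 1) := by
                  rw [hidx]; simpa using hrest
                rw [if_neg (by tauto), if_neg (by tauto), hn]
                exact ih _ _ _ _
              · rw [if_pos ⟨hc, hidx.mpr hrest⟩, if_pos ⟨hc, hrest⟩]
            · rw [if_neg (by tauto), if_neg (by tauto), hn]
              exact ih _ _ _ _
          · simp only [if_neg hr]; rw [hn]; exact ih _ _ _ _

-- the masked string has the same length (so the same "last character" position)
theorem pvMask_len : ∀ (n : Nat) (cs : List Char), cs.length ≤ n →
    (pvMaskOut cs).length = cs.length ∧ ∀ q, (pvMaskIn q cs).length = cs.length := by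
  intro n
  induction n with
  | zero =>
    intro cs h
    have : cs = [] := List.eq_nil_of_length_eq_zero (Nat.le_zero.mp h)
    subst this
    simp [pvMaskOut, pvMaskIn]
  | succ n ih =>
    intro cs h
    cases cs with
    | nil => simp [pvMaskOut, pvMaskIn]
    | cons c rest =>
      simp only [List.length_cons] at h
      have hrest : rest.length ≤ n := by omega
      constructor
      · rw [pvMaskOut]
        split_ifs <;> simp [(ih rest hrest).1, (ih rest hrest).2]
      · intro q
        rw [pvMaskIn]
        by_cases h1 : c = '\\'
        · rw [if_pos h1]
          cases rest with
          | nil => simp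
          | cons c2 r =>
            simp only [List.isEmpty_cons, Bool.false_eq_true, if_false, List.tail_cons,
              List.length_cons]
            have hr : r.length ≤ n := by simp only [List.length_cons] at h; omega
            simp [(ih r hr).2]
        · rw [if_neg h1]
          by_cases h2 : c = q
          · rw [if_pos h2]
            simp [(ih rest hrest).1]
          · rw [if_neg h2]
            simp [(ih rest hrest).2]

theorem pvMaskOut_ne_nil {cs : List Char} (h : cs ≠ []) : pvMaskOut cs ≠ [] := by
  intro hx
  have := (pvMask_len cs.length cs le_rfl).1
  rw [hx] at this
  exact h (List.eq_nil_of_length_eq_zero this.symm)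

-- the depth machine on the masked string
def pvChkM : List Char → Int → Bool × Int
  | [], d => (true, d)
  | ch :: rest, d =>
    if ch = '(' then pvChkM rest (d + 1)
    else if ch = ')' then
      if d - 1 = 0 ∧ rest ≠ [] then (false, d - 1)
      else pvChkM rest (d - 1)
    else pvChkM rest d

theorem pvChk_mask : ∀ (n : Nat) (cs : List Char), cs.length ≤ n → ∀ d : Int,
    (pvChk cs d none false = pvChkM (pvMaskOut cs) d) ∧
    (∀ q, (q = '"' ∨ q = '\'') → pvChk cs d (some q) false = pvChkM (pvMaskIn q cs) d) := by
  intro n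
  induction n with
  | zero =>
    intro cs h d
    have : cs = [] := List.eq_nil_of_length_eq_zero (Nat.le_zero.mp h)
    subst this
    simp [pvChk, pvChkM, pvMaskOut, pvMaskIn]
  | succ n ih =>
    intro cs h d
    cases cs with
    | nil => simp [pvChk, pvChkM, pvMaskOut, pvMaskIn]
    | cons c rest =>
      simp only [List.length_cons] at h
      have hrest : rest.length ≤ n := by omega
      constructor
      · rw [pvChk, pvMaskOut]
        by_cases hq : c = '"' ∨ c = '\''
        · rw [if_pos hq, if_pos hq, pvChkM]
          rw [if_neg (by decide : ¬ (' ' = '(')), if_neg (by decide : ¬ (' ' = ')'))]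
          exact (ih rest hrest d).2 c hq
        · rw [if_neg hq, if_neg hq, pvChkM]
          by_cases hl : c = '('
          · rw [if_pos hl, if_pos hl]
            exact (ih rest hrest (d + 1)).1
          · rw [if_neg hl, if_neg hl]
            by_cases hr : c = ')'
            · rw [if_pos hr, if_pos hr]
              have hne : rest ≠ [] ↔ pvMaskOut rest ≠ [] := by
                constructor
                · exact pvMaskOut_ne_nil
                · intro hx hy; subst hy; simp [pvMaskOut] at hx
              by_cases hc : d - 1 = 0 ∧ rest ≠ []
              · rw [if_pos hc, if_pos ⟨hc.1, hne.mp hc.2⟩]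
              · rw [if_neg hc, if_neg (by rw [← hne] at *; tauto)]
                exact (ih rest hrest (d - 1)).1
            · rw [if_neg hr, if_neg hr]
              exact (ih rest hrest d).1
      · intro q hqq
        rw [pvChk, pvMaskIn]
        simp only [Bool.false_eq_true, if_false]
        by_cases hb : c = '\\'
        · rw [if_pos hb, if_pos hb]
          cases rest with
          | nil => simp [pvChk, pvChkM]
          | cons c2 r =>
            have hr : r.length ≤ n := by simp only [List.length_cons] at h; omega
            rw [pvChk]
            simp only [if_pos rfl, List.isEmpty_cons, List.tail_cons, Bool.false_eq_true, if_false]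
            rw [pvChkM, if_neg (by decide : ¬ (' ' = '(')), if_neg (by decide : ¬ (' ' = ')')),
                pvChkM, if_neg (by decide : ¬ (' ' = '(')), if_neg (by decide : ¬ (' ' = ')'))]
            exact (ih r hr d).2 q hqq
        · rw [if_neg hb, if_neg hb]
          by_cases hcq : c = q
          · rw [if_pos hcq, if_pos hcq, pvChkM,
                if_neg (by decide : ¬ (' ' = '(')), if_neg (by decide : ¬ (' ' = ')'))]
            exact (ih rest hrest d).1
          · rw [if_neg hcq, if_neg hcq, pvChkM,
                if_neg (by decide : ¬ (' ' = '(')), if_neg (by decide : ¬ (' ' = ')'))]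
            exact (ih rest hrest d).2 q hqq

theorem pvDepths_len (d : Int) (m : List Char) : (pvDepths d m).length = m.length := by
  induction m generalizing d with
  | nil => simp [pvDepths]
  | cons c rest ih => simp [pvDepths, ih]

theorem pvDepths_ne_nil {m : List Char} (d : Int) (h : m ≠ []) : pvDepths d m ≠ [] := by
  intro hx
  have := pvDepths_len d m
  rw [hx] at this
  exact h (List.eq_nil_of_length_eq_zero this.symm)

-- the depth machine succeeds at 0 iff the depth list ends at 0 and stays ≥ 1 before that
theorem pvChkM_depths (m : List Char) : ∀ d : Int, 1 ≤ d →
    (pvChkM m d = (true, 0) ↔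
      ((pvDepths d m).getLastD d = 0 ∧ ∀ x ∈ (pvDepths d m).dropLast, 1 ≤ x)) := by
  induction m with
  | nil =>
    intro d hd
    simp only [pvChkM, pvDepths, List.getLastD_nil, List.dropLast_nil, List.not_mem_nil,
      false_implies, implies_true, and_true, Prod.mk.injEq, true_and]
  | cons c rest ih =>
    intro d hd
    have hD : pvDepths d (c :: rest) =
        (d + (if c = '(' then 1 else 0) - (if c = ')' then 1 else 0)) ::
          pvDepths (d + (if c = '(' then 1 else 0) - (if c = ')' then 1 else 0)) rest := rfl
    by_cases hl : c = '('
    · have hs : (d + (if c = '(' then (1:Int) else 0) - (if c = ')' then 1 else 0)) = d + 1 := by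
        rw [if_pos hl, if_neg (by rw [hl]; decide)]; ring
      rw [hD, hs, pvChkM, if_pos hl, List.getLastD_cons]
      cases hrest : rest with
      | nil =>
        subst hrest
        simp [pvDepths, pvChkM, Prod.mk.injEq]
      | cons c2 r =>
        rw [← hrest]
        have hrne : rest ≠ [] := by rw [hrest]; simp
        rw [List.dropLast_cons_of_ne_nil (pvDepths_ne_nil _ hrne),
            ih (d + 1) (by omega)]
        simp only [List.forall_mem_cons]
        have h1 : (1:Int) ≤ d + 1 := by omega
        tauto
    · by_cases hr : c = ')'
      · have hs : (d + (if c = '(' then (1:Int) else 0) - (if c = ')' then 1 else 0)) = d - 1 := by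
          rw [if_neg hl, if_pos hr]; ring
        rw [hD, hs, pvChkM, if_neg hl, if_pos hr, List.getLastD_cons]
        cases hrest : rest with
        | nil =>
          subst hrest
          simp [pvDepths, pvChkM, Prod.mk.injEq]
        | cons c2 r =>
          rw [← hrest]
          have hrne : rest ≠ [] := by rw [hrest]; simp
          rw [List.dropLast_cons_of_ne_nil (pvDepths_ne_nil _ hrne)]
          by_cases hc : d - 1 = 0
          · rw [if_pos ⟨hc, hrne⟩]
            constructor
            · intro hp
              exact absurd (congrArg Prod.fst hp) (by simp)
            · intro ⟨_, hall⟩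
              have : (1:Int) ≤ d - 1 := hall (d - 1) (by simp)
              omega
          · rw [if_neg (by tauto), ih (d - 1) (by omega)]
            simp only [List.forall_mem_cons]
            have h1 : (1:Int) ≤ d - 1 := by omega
            tauto
      · have hs : (d + (if c = '(' then (1:Int) else 0) - (if c = ')' then 1 else 0)) = d := by
          rw [if_neg hl, if_neg hr]; ring
        rw [hD, hs, pvChkM, if_neg hl, if_neg hr, List.getLastD_cons]
        cases hrest : rest with
        | nil =>
          subst hrest
          simp [pvDepths, pvChkM, Prod.mk.injEq]
        | cons c2 r =>
          rw [← hrest]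
          have hrne : rest ≠ [] := by rw [hrest]; simp
          rw [List.dropLast_cons_of_ne_nil (pvDepths_ne_nil _ hrne), ih d hd]
          simp only [List.forall_mem_cons]
          tauto

-- A's strip condition equals B's, for a string that starts '(' and ends ')'
theorem pvStrippable_iff (cs : List Char)
    (hs : PySem.Chars.startswith cs ['('] = true)
    (he : PySem.Chars.endswith cs [')'] = true) :
    ((pvCheckParens (PySem.List.enumerate cs 0) cs.length 0 none false).1 = true ∧
     (pvCheckParens (PySem.List.enumerate cs 0) cs.length 0 none false).2 = 0) ↔
    pvBStrippable cs = true := by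
  obtain ⟨cs', rfl⟩ : ∃ cs', cs = '(' :: cs' := by
    cases cs with
    | nil => simp [PySem.Chars.startswith, List.isPrefixOf] at hs
    | cons c rest =>
      refine ⟨rest, ?_⟩
      simp [PySem.Chars.startswith, List.isPrefixOf] at hs
      rw [← hs]
  have hcs' : cs' ≠ [] := by
    intro h
    subst h
    simp [PySem.Chars.endswith, List.isSuffixOf, List.isPrefixOf] at he
  have h0 : ((('(' :: cs').length : Int)) = (0 : Int) + (('(' :: cs').length : Int) := by ring
  rw [h0, pvCheckParens_enum]
  rw [pvChk, if_neg (by decide : ¬ ('(' = '"' ∨ '(' = '\'')), if_pos rfl]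
  rw [(pvChk_mask cs'.length cs' le_rfl (0 + 1)).1]
  have hM : pvMaskOut ('(' :: cs') = '(' :: pvMaskOut cs' := by
    rw [pvMaskOut, if_neg (by decide : ¬ ('(' = '"' ∨ '(' = '\''))]
  have hMne : pvMaskOut cs' ≠ [] := pvMaskOut_ne_nil hcs'
  have hDne : pvDepths 1 (pvMaskOut cs') ≠ [] := pvDepths_ne_nil 1 hMne
  simp only [pvBStrippable]
  rw [hM]
  have hD : pvDepths 0 ('(' :: pvMaskOut cs') = (1 : Int) :: pvDepths 1 (pvMaskOut cs') := by
    have h1 : ((0:Int) + (if ('(' : Char) = '(' then (1:Int) else 0)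
        - (if ('(' : Char) = ')' then 1 else 0)) = 1 := by decide
    rw [pvDepths, h1]
  rw [hD, List.getLastD_cons, List.dropLast_cons_of_ne_nil hDne]
  rw [show ((0:Int) + 1) = (1:Int) by ring]
  have hp : ((pvChkM (pvMaskOut cs') 1).1 = true ∧ (pvChkM (pvMaskOut cs') 1).2 = 0) ↔
      pvChkM (pvMaskOut cs') 1 = (true, 0) := by
    rw [Prod.ext_iff]
  rw [hp, pvChkM_depths (pvMaskOut cs') 1 le_rfl]
  constructor
  · intro ⟨h1, h2⟩
    simp only [Bool.and_eq_true, List.all_eq_true, decide_eq_true_eq,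
      Bool.not_eq_eq_eq_not, Bool.not_false, List.isEmpty_eq_false_iff]
    refine ⟨⟨by simp, h1⟩, ?_⟩
    intro x hx
    simp only [List.mem_cons] at hx
    rcases hx with hx | hx
    · omega
    · exact h2 x hx
  · intro hb
    simp only [Bool.and_eq_true, List.all_eq_true, decide_eq_true_eq,
      Bool.not_eq_eq_eq_not, Bool.not_false, List.isEmpty_eq_false_iff] at hb
    obtain ⟨⟨_, h1⟩, h2⟩ := hb
    exact ⟨h1, fun x hx => h2 x (List.mem_cons_of_mem _ hx)⟩

theorem pvStripGo_eq (n : Nat) : ∀ cs : List Char, cs.length ≤ n → pvStripGo cs = pvBStripGo cs := by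
  induction n with
  | zero =>
    intro cs h
    have : cs = [] := List.eq_nil_of_length_eq_zero (Nat.le_zero.mp h)
    subst this
    rw [pvStripGo, pvBStripGo, dif_neg (by decide), dif_neg (by decide)]
  | succ n ih =>
    intro cs h
    rw [pvStripGo, pvBStripGo]
    by_cases hg : (PySem.Chars.startswith cs ['('] && PySem.Chars.endswith cs [')']) = true
    · rw [dif_pos hg, dif_pos hg]
      have hne : cs ≠ [] := by
        intro hnil; subst hnil
        simp [PySem.Chars.startswith, List.isPrefixOf] at hg
      have hrec : (PySem.Chars.strip (PySem.List.slice cs (some 1) (some (-1)))).length ≤ n := by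
        have h1 := pvStrip_len_le (PySem.List.slice cs (some 1) (some (-1)))
        have h2 := pvSlice_len_lt cs hne
        omega
      simp only [Bool.and_eq_true] at hg
      have hiff := pvStrippable_iff cs hg.1 hg.2
      set r := pvCheckParens (PySem.List.enumerate cs 0) cs.length 0 none false with hr
      by_cases hcond : r.1 = true ∧ r.2 = 0
      · have hb : pvBStrippable cs = true := hiff.mp hcond
        rw [if_neg (by simp [hcond.1, hcond.2]), if_pos hb]
        exact ih _ hrec
      · have hb : pvBStrippable cs ≠ true := fun hx => hcond (hiff.mpr hx)
        rw [if_pos ?_, if_neg hb]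
        by_cases h1 : r.1 = true
        · have h2 : r.2 ≠ 0 := fun hx => hcond ⟨h1, hx⟩
          simp [h1, h2]
        · simp only [Bool.not_eq_true] at h1
          simp [h1]
    · rw [dif_neg hg, dif_neg hg]

theorem pvStrip_eq (cs : List Char) : pvStripOuterParens cs = pvBStrip cs := by
  unfold pvStripOuterParens pvBStrip
  exact pvStripGo_eq _ _ le_rfl

------------------------------------------------------------------
-- Part 2: A's union loop agrees with tokenize-then-validate
------------------------------------------------------------------

-- B's literal skip equals A's escape-flag scan started unescaped
theorem pvSkipLit_eq : ∀ (n : Nat) (cs : List Char), cs.length ≤ n →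
    pvSkipLit cs = pvScanLit cs false := by
  intro n
  induction n with
  | zero =>
    intro cs h
    have : cs = [] := List.eq_nil_of_length_eq_zero (Nat.le_zero.mp h)
    subst this
    simp [pvSkipLit, pvScanLit]
  | succ n ih =>
    intro cs h
    cases cs with
    | nil => simp [pvSkipLit, pvScanLit]
    | cons c rest =>
      simp only [List.length_cons] at h
      rw [pvSkipLit, pvScanLit]
      simp only [Bool.false_eq_true, if_false]
      by_cases h1 : c = '"'
      · have hb : ¬ c = '\\' := by rw [h1]; decide
        rw [if_pos h1, if_neg hb, if_pos h1]
      · by_cases h2 : c = '\\'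
        · rw [if_neg h1, if_pos h2, if_pos h2]
          cases rest with
          | nil => simp [pvSkipLit, pvScanLit]
          | cons c2 r =>
            rw [pvScanLit]
            simp only [if_pos rfl, List.tail_cons]
            exact ih r (by simp only [List.length_cons] at h; omega)
        · rw [if_neg h1, if_neg h2, if_neg h2, if_neg h1]
          exact ih rest (by omega)

theorem pvSkipLit_eq' (cs : List Char) : pvSkipLit cs = pvScanLit cs false :=
  pvSkipLit_eq cs.length cs le_rfl

-- A's interleaved automaton, replayed on the token list (e is A's expect_literal flag)
def pvValidFrom : Bool → List PvTok → Bool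
  | e, [] => !e
  | true, PvTok.lit :: r => pvValidFrom false r
  | true, PvTok.pipe :: _ => false
  | false, PvTok.pipe :: r => pvValidFrom true r
  | false, PvTok.lit :: _ => false

-- the alternation check of B, recursively (expect a literal iff e)
def pvAltB : Bool → List PvTok → Bool
  | _, [] => true
  | e, t :: r => (t == (if e then PvTok.lit else PvTok.pipe)) && pvAltB (!e) r

theorem pvTokenize_dropWhile (cs : List Char) :
    pvTokenize (cs.dropWhile PySem.Chars.isspace) = pvTokenize cs := by
  induction cs with
  | nil => rfl
  | cons c rest ih =>
    by_cases hc : PySem.Chars.isspace c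
    · rw [List.dropWhile_cons_of_pos (by simpa using hc)]
      rw [ih]
      conv_rhs => rw [pvTokenize]
      simp [hc]
    · rw [List.dropWhile_cons_of_neg (by simpa using hc)]

theorem pvHead_dropWhile_not {cs rest : List Char} {c : Char}
    (h : cs.dropWhile PySem.Chars.isspace = c :: rest) : PySem.Chars.isspace c = false := by
  induction cs with
  | nil => simp at h
  | cons a l ih =>
    by_cases ha : PySem.Chars.isspace a
    · rw [List.dropWhile_cons_of_pos (by simpa using ha)] at h
      exact ih h
    · rw [List.dropWhile_cons_of_neg (by simpa using ha)] at h
      cases h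
      simpa using ha

theorem pvALoop_eq (n : Nat) : ∀ (cs : List Char), cs.length ≤ n → ∀ (e : Bool),
    pvALoop cs e = (pvTokenize cs).elim false (pvValidFrom e) := by
  induction n with
  | zero =>
    intro cs hcs e
    have : cs = [] := List.eq_nil_of_length_eq_zero (Nat.le_zero.mp hcs)
    subst this
    rw [pvALoop.eq_def]
    cases e <;> simp [pvTokenize, pvValidFrom, List.dropWhile]
  | succ n ih =>
    intro cs hcs e
    rw [pvALoop.eq_def, ← pvTokenize_dropWhile cs]
    cases hd : cs.dropWhile PySem.Chars.isspace with
    | nil => cases e <;> simp [pvTokenize, pvValidFrom]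
    | cons c rest =>
      simp only []
      have hc : PySem.Chars.isspace c = false := pvHead_dropWhile_not hd
      have hlen : rest.length + 1 ≤ cs.length := by
        have h := List.length_dropWhile_le PySem.Chars.isspace cs
        rw [hd] at h
        simpa using h
      cases e with
      | true =>
        by_cases hq : c = '"'
        · subst hq
          rw [pvTokenize]
          simp only [hc, Bool.false_eq_true, if_false, if_pos rfl, if_true, ne_eq,
            not_true_eq_false, ite_false]
          rw [pvSkipLit_eq']
          cases hs : pvScanLit rest false with
          | none => simp
          | some r =>
            have hr : r.length ≤ n := by
              have := pvScanLit_len hs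
              omega
            have hi := ih r hr false
            cases htok : pvTokenize r <;> simp_all [pvValidFrom, Function.comp]
        · rw [pvTokenize]
          simp only [hc, Bool.false_eq_true, if_false, if_neg hq, ne_eq, hq, not_false_eq_true,
            if_true]
          by_cases hp : c = '|'
          · subst hp
            simp only [if_pos rfl]
            cases pvTokenize rest <;> simp [pvValidFrom, Function.comp]
          · simp [hp]
      | false =>
        rw [List.dropWhile_cons_of_neg (by simp [hc])]
        simp only [Bool.false_eq_true, if_false]
        by_cases hp : c = '|'
        · subst hp
          rw [pvTokenize]
          simp only [hc, Bool.false_eq_true, if_false, if_neg (by decide : ¬ ('|' = '"')),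
            if_pos rfl, ne_eq, not_true_eq_false, ite_false]
          rw [ih rest (by omega) true]
          cases pvTokenize rest <;> simp [pvValidFrom, Function.comp]
        · simp only [ne_eq, hp, not_false_eq_true, if_true]
          by_cases hq : c = '"'
          · subst hq
            rw [pvTokenize]
            simp only [hc, Bool.false_eq_true, if_false, if_pos rfl]
            rw [pvSkipLit_eq']
            cases hs : pvScanLit rest false with
            | none => simp
            | some r => cases htok : pvTokenize r <;> simp [htok, pvValidFrom, Function.comp]
          · rw [pvTokenize]
            simp [hc, hq, hp]

theorem pvEnumAll (ts : List PvTok) : ∀ (s : Nat),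
    ((PySem.List.enumerate ts (s : Int)).all
        fun p => p.2 == if p.1 % 2 == 0 then PvTok.lit else PvTok.pipe)
      = pvAltB (s % 2 == 0) ts := by
  induction ts with
  | nil => intro s; simp [PySem.List.enumerate_nil, pvAltB]
  | cons t r ih =>
    intro s
    rw [PySem.List.enumerate_cons, List.all_cons]
    have h1 : ((s : Int) + 1) = ((s + 1 : Nat) : Int) := by push_cast; ring
    rw [h1, ih (s + 1)]
    conv_rhs => rw [pvAltB]
    have hmod : ((s : Int) % 2 == 0) = ((s % 2 == 0 : Bool)) := by
      rcases Nat.mod_two_eq_zero_or_one s with h | h <;>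
        · have : (s : Int) % 2 = ((s % 2 : Nat) : Int) := by omega
          simp [this, h]
    have hflip : ((s + 1) % 2 == 0 : Bool) = !(s % 2 == 0) := by
      rcases Nat.mod_two_eq_zero_or_one s with h | h <;> simp [Nat.add_mod, h]
    rw [hmod, hflip]

theorem pvValidFrom_eq (ts : List PvTok) : ∀ (e : Bool),
    pvValidFrom e ts = (decide (ts.length % 2 = if e then 1 else 0) && pvAltB e ts) := by
  induction ts with
  | nil => intro e; cases e <;> simp [pvValidFrom, pvAltB]
  | cons t r ih =>
    intro e
    rcases Nat.mod_two_eq_zero_or_one r.length with h | h <;>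
      cases e <;> cases t <;>
        simp [pvValidFrom, pvAltB, ih, Nat.add_mod, h]

theorem pvValidate_eq (ts : List PvTok) : pvValidate ts = pvValidFrom true ts := by
  have h := pvEnumAll ts 0
  simp only [Nat.cast_zero] at h
  rw [pvValidate, h, pvValidFrom_eq ts true]
  simp

-- ===== VERDICT (by name: the statement is the Claim_ definition above) =====
theorem is_string_union_py_spec : Claim_equal_is_string_union_py := by
  intro expr _
  unfold Spec_is_string_union_py is_string_union_py is_string_union_py_alt
  rw [← pvStrip_eq]
  by_cases h : pvStripOuterParens expr.toList = []
  · simp [h]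
  · simp only [if_neg h]
    rw [pvALoop_eq (pvStripOuterParens expr.toList).length _ le_rfl true]
    cases pvTokenize (pvStripOuterParens expr.toList) with
    | none => rfl
    | some ts => simp [pvValidate_eq ts]
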